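-- pv_equiv track=rewrite | github.com/manuhslu/IFC_Generator_Briefkasten | generate_mailbox_v2.py | inset_rectangle
-- ===== SOURCE A (Python) =====
-- def inset_rectangle(points, offset):
--     xs = [p[0] for p in points]
--     ys = [p[1] for p in points]
--     xmin, xmax = min(xs), max(xs)
--     ymin, ymax = min(ys), max(ys)
--     return [
--         (xmin + offset, ymin + offset),
--         (xmin + offset, ymax - offset),
--         (xmax - offset, ymax - offset),
--         (xmax - offset, ymin + offset),
--     ]
-- ===== SOURCE B (Python) =====
-- def inset_rectangle(points, offset):
--     xs = sorted(p[0] for p in points)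
--     ys = sorted(p[1] for p in points)
--     return [
--         (xs[0] + offset, ys[0] + offset),
--         (xs[0] + offset, ys[-1] - offset),
--         (xs[-1] - offset, ys[-1] - offset),
--         (xs[-1] - offset, ys[0] + offset),
--     ]
-- ===== Notes on version B (the rewrite author's own statement) =====
-- stated objective: alternative
-- what changed: Instead of scanning for extremes with min/max, B sorts each coordinate list and reads the bounding box off the endpoints xs[0]/xs[-1], ys[0]/ys[-1]; correct because a sorted list's first and last elements are exactly its minimum and maximum.
import Mathlib
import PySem

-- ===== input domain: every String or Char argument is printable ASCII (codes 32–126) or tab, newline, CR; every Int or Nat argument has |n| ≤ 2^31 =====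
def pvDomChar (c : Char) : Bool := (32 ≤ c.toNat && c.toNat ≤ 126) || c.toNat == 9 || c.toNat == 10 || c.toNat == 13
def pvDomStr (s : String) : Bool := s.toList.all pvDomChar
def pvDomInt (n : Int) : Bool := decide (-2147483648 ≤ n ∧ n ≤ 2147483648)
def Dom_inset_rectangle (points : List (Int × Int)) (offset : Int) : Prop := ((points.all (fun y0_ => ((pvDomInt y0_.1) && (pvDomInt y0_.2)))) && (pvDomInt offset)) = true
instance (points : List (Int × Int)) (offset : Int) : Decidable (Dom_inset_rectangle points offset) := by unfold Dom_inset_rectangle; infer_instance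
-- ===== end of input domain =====

-- B sorts each coordinate list and reads the bounding box off the sorted endpoints instead of A's min/max scans (alternative algorithm, same return value).


-- ===== PORT A =====
def inset_rectangle (points : List (Int × Int)) (offset : Int) : List (Int × Int) :=
  let xs := points.map (fun p => p.1)
  let ys := points.map (fun p => p.2)
  match PySem.List.min? xs (fun x => x), PySem.List.max? xs (fun x => x),
        PySem.List.min? ys (fun y => y), PySem.List.max? ys (fun y => y) with
  | some xmin, some xmax, some ymin, some ymax =>
      [ (xmin + offset, ymin + offset),
        (xmin + offset, ymax - offset),
        (xmax - offset, ymax - offset),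
        (xmax - offset, ymin + offset) ]
  | _, _, _, _ => []  -- unreachable under Pre_: Python's min([]) raises ValueError

-- ===== PORT B =====
def inset_rectangle_alt (points : List (Int × Int)) (offset : Int) : List (Int × Int) :=
  let xs := PySem.List.sorted (points.map (fun p => p.1)) (fun x => x) false
  let ys := PySem.List.sorted (points.map (fun p => p.2)) (fun x => x) false
  match PySem.List.pyGet? xs 0 with
  | none => []  -- unreachable under Pre_: Python B's xs[0] raises IndexError on []
  | some x0 =>
    match PySem.List.pyGet? xs (-1) with
    | none => []
    | some xl =>
      match PySem.List.pyGet? ys 0 with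
      | none => []
      | some y0 =>
        match PySem.List.pyGet? ys (-1) with
        | none => []
        | some yl =>
          [ (x0 + offset, y0 + offset),
            (x0 + offset, yl - offset),
            (xl - offset, yl - offset),
            (xl - offset, y0 + offset) ]

-- ===== PRECONDITION & SPEC =====
-- Pre_ excludes only the empty list, on which Python A raises ValueError (min of empty sequence).
def Pre_inset_rectangle (points : List (Int × Int)) (offset : Int) : Prop := points ≠ []
instance (points : List (Int × Int)) (offset : Int) : Decidable (Pre_inset_rectangle points offset) := by unfold Pre_inset_rectangle; infer_instance
def pvWitness_inset_rectangle : (List (Int × Int)) × Int := ([(0, 0), (4, 3)], 1)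
def Spec_inset_rectangle (points : List (Int × Int)) (offset : Int) (out : List (Int × Int)) : Prop := out = inset_rectangle_alt points offset
instance (points : List (Int × Int)) (offset : Int) (out : List (Int × Int)) : Decidable (Spec_inset_rectangle points offset out) := by unfold Spec_inset_rectangle; infer_instance

-- ===== CLAIM =====
def Claim_equal_inset_rectangle : Prop := ∀ (points : List (Int × Int)) (offset : Int), Dom_inset_rectangle points offset → Pre_inset_rectangle points offset → Spec_inset_rectangle points offset (inset_rectangle points offset)

-- ===== LEMMAS AND PROOFS =====

theorem foldl_min_mem : ∀ (t : List Int) (x : Int), t.foldl min x ∈ x :: t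
  | [], x => by simp
  | a :: t, x => by
      simp only [List.foldl]
      rcases List.mem_cons.1 (foldl_min_mem t (min x a)) with h | h
      · rw [h]
        rcases le_total x a with hle | hle
        · simp [min_eq_left hle]
        · simp [min_eq_right hle]
      · simp [h]

theorem foldl_min_le : ∀ (t : List Int) (x : Int), ∀ y ∈ x :: t, t.foldl min x ≤ y
  | [], x => by simp
  | a :: t, x => by
      intro y hy
      simp only [List.foldl]
      have hb := foldl_min_le t (min x a)
      rcases List.mem_cons.1 hy with rfl | h
      · exact le_trans (hb _ (List.mem_cons_self)) (min_le_left _ _)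
      · rcases List.mem_cons.1 h with rfl | h'
        · exact le_trans (hb _ (List.mem_cons_self)) (min_le_right _ _)
        · exact hb y (List.mem_cons_of_mem _ h')

theorem foldl_max_mem : ∀ (t : List Int) (x : Int), t.foldl max x ∈ x :: t
  | [], x => by simp
  | a :: t, x => by
      simp only [List.foldl]
      rcases List.mem_cons.1 (foldl_max_mem t (max x a)) with h | h
      · rw [h]
        rcases le_total x a with hle | hle
        · simp [max_eq_right hle]
        · simp [max_eq_left hle]
      · simp [h]

theorem foldl_max_ge : ∀ (t : List Int) (x : Int), ∀ y ∈ x :: t, y ≤ t.foldl max x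
  | [], x => by simp
  | a :: t, x => by
      intro y hy
      simp only [List.foldl]
      have hb := foldl_max_ge t (max x a)
      rcases List.mem_cons.1 hy with rfl | h
      · exact le_trans (le_max_left _ _) (hb _ (List.mem_cons_self))
      · rcases List.mem_cons.1 h with rfl | h'
        · exact le_trans (le_max_right _ _) (hb _ (List.mem_cons_self))
        · exact hb y (List.mem_cons_of_mem _ h')

-- the last element of a ≤-pairwise list bounds every element from above
theorem pairwise_le_getLast (l : List Int) (hp : l.Pairwise (· ≤ ·)) (h : l ≠ []) :
    ∀ y ∈ l, y ≤ l.getLast h := by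
  induction l with
  | nil => simp at h
  | cons a t ih =>
      intro y hy
      cases t with
      | nil => simp at hy; simp [hy, List.getLast]
      | cons b t' =>
          rcases List.mem_cons.1 hy with rfl | hy'
          · have := List.rel_of_pairwise_cons hp (l := b :: t') (List.getLast_mem (by simp))
            simpa [List.getLast_cons] using this
          · have := ih (List.Pairwise.of_cons hp) (by simp) y hy'
            simpa [List.getLast_cons] using this

-- head of sorted(l) is the running min; last of sorted(l) is the running max
theorem sorted_head_getLast (x : Int) (t : List Int) :
    PySem.List.pyGet? (PySem.List.sorted (x :: t) (fun v => v) false) 0 = some (t.foldl min x) ∧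
    PySem.List.pyGet? (PySem.List.sorted (x :: t) (fun v => v) false) (-1) = some (t.foldl max x) := by
  set s := PySem.List.sorted (x :: t) (fun v => v) false with hs
  have hperm : s.Perm (x :: t) := PySem.List.sorted_perm _ _ _
  have hne : s ≠ [] := by
    intro h0; rw [h0] at hperm; exact (List.cons_ne_nil x t) hperm.symm.eq_nil
  obtain ⟨m, u, hcons⟩ := List.exists_cons_of_ne_nil hne
  have hpw : s.Pairwise (fun a b => a ≤ b) := PySem.List.sorted_pairwise _ _
  have hmemS : ∀ y, y ∈ s ↔ y ∈ x :: t := fun y => hperm.mem_iff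
  -- head = min
  have hminmem : t.foldl min x ∈ x :: t := foldl_min_mem t x
  have hhead_le : ∀ y ∈ x :: t, m ≤ y := by
    intro y hy
    exact PySem.List.key_head_sorted_le _ _ (hs.symm.trans hcons) y hy
  have hm_mem : m ∈ x :: t := (hmemS m).1 (by simp [hcons])
  have h1 : m = t.foldl min x :=
    le_antisymm (hhead_le _ hminmem) (foldl_min_le t x m hm_mem)
  -- last = max
  have hlast := pairwise_le_getLast s hpw hne
  have hlast_mem : s.getLast hne ∈ x :: t := (hmemS _).1 (List.getLast_mem hne)
  have hmaxmem : t.foldl max x ∈ s := (hmemS _).2 (foldl_max_mem t x)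
  have h2 : s.getLast hne = t.foldl max x :=
    le_antisymm (foldl_max_ge t x _ hlast_mem) (hlast _ hmaxmem)
  constructor
  · rw [PySem.List.pyGet?_zero, hcons]; simp [h1.symm]
  · rw [PySem.List.pyGet?_neg_one, List.getLast?_eq_some_getLast hne, h2]

-- ===== VERDICT =====
theorem inset_rectangle_spec : Claim_equal_inset_rectangle := by
  intro points offset _ hpre
  match points with
  | [] => exact absurd rfl hpre
  | p :: rest =>
      show inset_rectangle (p :: rest) offset = inset_rectangle_alt (p :: rest) offset
      have hx := sorted_head_getLast p.1 (rest.map (fun q => q.1))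
      have hy := sorted_head_getLast p.2 (rest.map (fun q => q.2))
      simp only [inset_rectangle, inset_rectangle_alt, List.map,
        PySem.List.min?_id_cons, PySem.List.max?_id_cons, hx.1, hx.2, hy.1, hy.2]
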